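-- pv_equiv track=rewrite | github.com/JohnsonGeng/lintcode_exercise | 1154_done.py | judge
-- ===== SOURCE A (Python) =====
-- def judge(record):
--     # Write your code here.
--
--     countD = 0
--
--     for i in range(len(record)):
--         if record[i] == 'D':
--             countD += 1
--         # 连续三天迟到
--         elif i < len(record ) -2 and record[i] == record[ i +1] == record[ i +2] == 'L':
--             return True
--         else:
--             continue
--
--     if countD >= 2:
--         return True
--     else:
--         return False
-- ===== SOURCE B (Python) =====
-- def judge(record):
--     # Two separate checks: total absences, then a running consecutive-'L' counter.
--     if record.count('D') >= 2:
--         return True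
--     run = 0
--     for c in record:
--         run = run + 1 if c == 'L' else 0
--         if run == 3:
--             return True
--     return False
-- ===== Notes on version B (the rewrite author's own statement) =====
-- stated objective: simpler
-- what changed: Replaced the single indexed pass with a 3-wide lookahead window by two separate checks: a count('D') >= 2 test and a running consecutive-'L' counter scan.
import Mathlib
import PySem

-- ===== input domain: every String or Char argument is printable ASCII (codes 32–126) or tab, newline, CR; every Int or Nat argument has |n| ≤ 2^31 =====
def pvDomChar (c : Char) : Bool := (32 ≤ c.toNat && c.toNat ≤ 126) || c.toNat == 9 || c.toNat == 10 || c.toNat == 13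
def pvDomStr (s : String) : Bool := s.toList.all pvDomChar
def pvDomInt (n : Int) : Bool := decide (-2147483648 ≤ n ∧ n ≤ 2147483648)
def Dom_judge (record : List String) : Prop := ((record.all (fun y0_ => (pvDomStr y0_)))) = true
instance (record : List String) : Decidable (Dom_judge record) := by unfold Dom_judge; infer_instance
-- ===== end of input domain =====

-- B separates the two conditions into two plain passes (count of 'D', then a running consecutive-'L' counter); same results, simpler shape.

-- ===== PORT A =====
-- index loop of A: for i in range(len(record)): count 'D' / early-return on a 3-wide 'LLL' window
def judgeLoopA (record : List String) (i : Nat) (countD : Nat) : Bool :=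
  if i < record.length then
    if record.getD i "" = "D" then
      judgeLoopA record (i + 1) (countD + 1)
    else if i + 2 < record.length ∧ record.getD i "" = record.getD (i + 1) ""
            ∧ record.getD (i + 1) "" = record.getD (i + 2) "" ∧ record.getD (i + 2) "" = "L" then
      true
    else
      judgeLoopA record (i + 1) countD
  else
    countD ≥ 2
termination_by record.length - i

def judge (record : List String) : Bool := judgeLoopA record 0 0

-- ===== PORT B =====
def judgeRunB (l : List String) (run : Nat) : Bool :=
  match l with
  | [] => false
  | c :: rest =>
    let run' := if c = "L" then run + 1 else 0
    if run' = 3 then true else judgeRunB rest run'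

def judge_alt (record : List String) : Bool :=
  if record.count "D" ≥ 2 then true else judgeRunB record 0

-- ===== PRECONDITION & SPEC =====
def Spec_judge (record : List String) (out : Bool) : Prop := out = judge_alt record
instance (record : List String) (out : Bool) : Decidable (Spec_judge record out) := by unfold Spec_judge; infer_instance

-- ===== CLAIM (what is proved, stated in full; the proofs are below) =====
def Claim_equal_judge : Prop := ∀ (record : List String), Dom_judge record → Spec_judge record (judge record)

-- ===== LEMMAS AND PROOFS =====

/-- "three consecutive L's somewhere" -/
def hasLLL : List String → Bool
  | a :: b :: c :: rest => (a = "L" ∧ b = "L" ∧ c = "L") || hasLLL (b :: c :: rest)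
  | _ => false

theorem hasLLL_cons_ne (c : String) (l : List String) (h : c ≠ "L") :
    hasLLL (c :: l) = hasLLL l := by
  match l with
  | [] => simp [hasLLL]
  | [b] => simp [hasLLL]
  | b :: d :: t => simp [hasLLL, h]

theorem hasLLL_cons_cons_ne (a c : String) (l : List String) (h : c ≠ "L") :
    hasLLL (a :: c :: l) = hasLLL l := by
  match l with
  | [] => simp [hasLLL]
  | b :: t => simp [hasLLL, h, hasLLL_cons_ne c (b :: t) h]

theorem judgeRunB_spec (l : List String) (r : Nat) (hr : r ≤ 2) :
    judgeRunB l r = hasLLL (List.replicate r "L" ++ l) := by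
  induction l generalizing r with
  | nil =>
    interval_cases r <;> simp [judgeRunB, hasLLL, List.replicate]
  | cons c rest ih =>
    by_cases hc : c = "L"
    · subst hc
      by_cases h3 : r = 2
      · subst h3
        simp [judgeRunB, hasLLL, List.replicate]
      · have hr' : r + 1 ≤ 2 := by omega
        have : judgeRunB ("L" :: rest) r = judgeRunB rest (r + 1) := by
          simp [judgeRunB]; omega
        rw [this, ih (r + 1) hr']
        have : List.replicate r "L" ++ "L" :: rest = List.replicate (r + 1) "L" ++ rest := by
          rw [List.replicate_succ' ]
          simp
        rw [this]
    · have hstep : judgeRunB (c :: rest) r = judgeRunB rest 0 := by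
        simp [judgeRunB, hc]
      rw [hstep, ih 0 (by omega)]
      simp only [List.replicate_zero, List.nil_append]
      interval_cases r <;>
        simp [List.replicate, hasLLL, hc, hasLLL_cons_ne c rest hc,
          hasLLL_cons_cons_ne "L" c rest hc]

theorem judgeLoopA_spec (record : List String) (i cd : Nat) :
    judgeLoopA record i cd = (hasLLL (record.drop i) || decide (cd + (record.drop i).count "D" ≥ 2)) := by
  induction i, cd using judgeLoopA.induct record with
  | case1 i cd hlt hD ih =>
    have hdrop : record.drop i = record[i] :: record.drop (i + 1) := List.drop_eq_getElem_cons hlt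
    have hget : record.getD i "" = record[i] := by
      simp [List.getD, List.getElem?_eq_getElem hlt]
    rw [hget] at hD
    unfold judgeLoopA
    simp only [hlt, if_pos, hget, hD]
    rw [ih, hdrop, hD, hasLLL_cons_ne "D" _ (by decide), List.count_cons]
    have harith : cd + 1 + (record.drop (i+1)).count "D"
        = cd + ((record.drop (i+1)).count "D" + 1) := by omega
    simp [harith]
  | case2 i cd hlt hD hwin =>
    have hdrop : record.drop i = record[i] :: record.drop (i + 1) := List.drop_eq_getElem_cons hlt
    unfold judgeLoopA
    simp only [hlt, if_pos]
    have hget : record.getD i "" = record[i] := by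
      simp [List.getD, List.getElem?_eq_getElem hlt]
    rw [hget] at hD
    rw [if_neg (by rw [hget]; exact hD), if_pos hwin]
    obtain ⟨h2, e01, e12, e2L⟩ := hwin
    have h1 : i + 1 < record.length := by omega
    have h2' : i + 2 < record.length := h2
    have hdrop1 : record.drop (i+1) = record[i+1] :: record.drop (i + 2) := List.drop_eq_getElem_cons h1
    have hdrop2 : record.drop (i+2) = record[i+2] :: record.drop (i + 3) := List.drop_eq_getElem_cons h2'
    have g1 : record.getD (i+1) "" = record[i+1] := by
      simp [List.getD, List.getElem?_eq_getElem h1]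
    have g2 : record.getD (i+2) "" = record[i+2] := by
      simp [List.getD, List.getElem?_eq_getElem h2']
    rw [hget] at e01; rw [g1] at e01 e12; rw [g2] at e12 e2L
    rw [hdrop, hdrop1, hdrop2]
    simp [hasLLL, e01, e12, e2L]
  | case3 i cd hlt hD hwin ih =>
    have hdrop : record.drop i = record[i] :: record.drop (i + 1) := List.drop_eq_getElem_cons hlt
    have hget : record.getD i "" = record[i] := by
      simp [List.getD, List.getElem?_eq_getElem hlt]
    rw [hget] at hD
    unfold judgeLoopA
    simp only [hlt, if_pos]
    have hhas : hasLLL (record[i] :: record.drop (i+1)) = hasLLL (record.drop (i+1)) := by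
      by_cases hL : record[i] = "L"
      · by_cases h2 : i + 2 < record.length
        · have h1 : i + 1 < record.length := by omega
          have g1 : record.getD (i+1) "" = record[i+1] := by
            simp [List.getD, List.getElem?_eq_getElem h1]
          have g2 : record.getD (i+2) "" = record[i+2] := by
            simp [List.getD, List.getElem?_eq_getElem h2]
          rw [List.drop_eq_getElem_cons h1, List.drop_eq_getElem_cons h2]
          have hne : ¬(record[i] = record[i+1] ∧ record[i+1] = record[i+2] ∧ record[i+2] = "L") := by
            intro hc
            exact hwin ⟨h2, by rw [hget, g1]; exact hc.1, by rw [g1, g2]; exact hc.2.1,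
              by rw [g2]; exact hc.2.2⟩
          simp only [hasLLL]
          have : ¬(record[i] = "L" ∧ record[i+1] = "L" ∧ record[i+2] = "L") := by
            intro ⟨a, b, c⟩
            exact hne ⟨by rw [a, b], by rw [b, c], c⟩
          simp [this]
        · have hlen : (record.drop (i+1)).length ≤ 1 := by
            simp [List.length_drop]; omega
          match hdd : record.drop (i+1) with
          | [] => simp [hasLLL]
          | [b] => simp [hasLLL]
          | b :: c :: t => rw [hdd] at hlen; simp at hlen
      · exact hasLLL_cons_ne _ _ hL
    rw [if_neg (by rw [hget]; exact hD), if_neg hwin, ih, hdrop]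
    rw [List.count_cons, hhas]
    simp [hD]
  | case4 i cd hnlt =>
    have : record.drop i = [] := List.drop_eq_nil_of_le (by omega)
    unfold judgeLoopA
    simp [hnlt, this, hasLLL]

-- ===== VERDICT (by name: the statement is the Claim_ definition above) =====
theorem judge_spec : Claim_equal_judge := by
  intro record _
  unfold Spec_judge judge judge_alt
  rw [judgeLoopA_spec, judgeRunB_spec record 0 (by omega)]
  simp [List.drop]
  by_cases h : 2 ≤ record.count "D" <;> simp [h, Bool.or_comm]
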